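-- pv_equiv track=rewrite | github.com/JhonesBR/python-exercises | 4 - Python String Exercise/ex04.py | lowerFirst
-- ===== SOURCE A (Python) =====
-- def lowerFirst(s):
--     lowers, uppers = [], []
--     for c in s:
--         if c.islower():
--             lowers.append(c)
--         else:
--             uppers.append(c)
--     return "".join(lowers) + "".join(uppers)
-- ===== SOURCE B (Python) =====
-- def lowerFirst(s):
--     return "".join(sorted(s, key=lambda c: not c.islower()))
-- ===== Notes on version B (the rewrite author's own statement) =====
-- stated objective: idiomatic
-- what changed: replaced the two-bucket append loop with a single stable sort keyed on whether the char is not lowercase, relying on sort stability to keep each group in original order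
import Mathlib
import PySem

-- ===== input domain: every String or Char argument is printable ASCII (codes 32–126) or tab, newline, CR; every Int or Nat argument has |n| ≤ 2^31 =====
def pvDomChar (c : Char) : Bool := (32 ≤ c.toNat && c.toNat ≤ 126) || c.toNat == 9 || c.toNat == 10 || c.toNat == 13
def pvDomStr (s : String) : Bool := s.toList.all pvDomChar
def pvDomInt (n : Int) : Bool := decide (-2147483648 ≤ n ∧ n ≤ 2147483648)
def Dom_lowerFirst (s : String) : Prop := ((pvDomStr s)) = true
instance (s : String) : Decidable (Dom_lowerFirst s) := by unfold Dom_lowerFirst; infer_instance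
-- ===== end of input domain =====

-- B replaces A's two-bucket append loop with one stable sort keyed on `not c.islower()` (idiomatic, same result).

-- ===== PORT A =====
-- the loop appending each char to `lowers` or `uppers`, then "".join(lowers) + "".join(uppers)
def lowerFirst (s : String) : String :=
  let p := s.toList.foldl
    (fun (acc : List Char × List Char) c =>
      if PySem.Chars.islower c then (acc.1 ++ [c], acc.2) else (acc.1, acc.2 ++ [c]))
    ([], [])
  String.ofList p.1 ++ String.ofList p.2

-- ===== PORT B =====
-- "".join(sorted(s, key=lambda c: not c.islower()))
def lowerFirst_alt (s : String) : String :=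
  String.ofList (PySem.List.sorted s.toList (fun c => !(PySem.Chars.islower c)) false)

-- ===== PRECONDITION & SPEC =====
def Spec_lowerFirst (s : String) (out : String) : Prop := out = lowerFirst_alt s
instance (s : String) (out : String) : Decidable (Spec_lowerFirst s out) := by unfold Spec_lowerFirst; infer_instance

-- ===== CLAIM (what is proved, stated in full; the proofs are below) =====
def Claim_equal_lowerFirst : Prop := ∀ (s : String), Dom_lowerFirst s → Spec_lowerFirst s (lowerFirst s)

-- ===== LEMMAS AND PROOFS =====

-- inserting x between the elements it is not-before (fl) and those it is before (fh) is stable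
theorem insertBy_split {α : Type} (bf : α → α → Bool) (x : α) (fl fh : List α)
    (hh : ∀ y ∈ fh, bf x y = true) :
    (∀ y ∈ fl, bf x y = false) → PySem.List.insertBy bf x (fl ++ fh) = fl ++ x :: fh := by
  induction fl with
  | nil =>
    intro _
    cases fh with
    | nil => simp [PySem.List.insertBy]
    | cons y t => simp [PySem.List.insertBy, hh y (by simp)]
  | cons a rest ih =>
    intro hl
    have ha : bf x a = false := hl a (by simp)
    simp [PySem.List.insertBy, ha, ih (fun y hy => hl y (by simp [hy]))]

-- the insertion-sort fold with the boolean key keeps the state partitioned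
theorem sorted_key_partition (xs fl fh : List Char)
    (hl : ∀ y ∈ fl, PySem.Chars.islower y = true)
    (hh : ∀ y ∈ fh, PySem.Chars.islower y = false) :
    xs.foldl (fun acc x =>
        PySem.List.insertBy
          (fun a b => decide ((!(PySem.Chars.islower a)) < (!(PySem.Chars.islower b)))) x acc)
      (fl ++ fh)
    = (fl ++ xs.filter (fun c => PySem.Chars.islower c)) ++
      (fh ++ xs.filter (fun c => !(PySem.Chars.islower c))) := by
  induction xs generalizing fl fh with
  | nil => simp
  | cons x t ih =>
    by_cases hx : PySem.Chars.islower x = true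
    · have step : PySem.List.insertBy
          (fun a b => decide ((!(PySem.Chars.islower a)) < (!(PySem.Chars.islower b)))) x (fl ++ fh)
          = (fl ++ [x]) ++ fh := by
        rw [insertBy_split _ _ fl fh
          (fun y hy => by simp [hx, hh y hy])
          (fun y hy => by simp [hx, hl y hy])]
        simp
      simp only [List.foldl_cons, step]
      rw [ih (fl ++ [x]) fh
        (fun y hy => by
          rcases List.mem_append.1 hy with h | h
          · exact hl y h
          · rw [List.mem_singleton.1 h]; exact hx)
        hh]
      simp [hx]
    · have hx' : PySem.Chars.islower x = false := by simpa using hx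
      have step : PySem.List.insertBy
          (fun a b => decide ((!(PySem.Chars.islower a)) < (!(PySem.Chars.islower b)))) x (fl ++ fh)
          = (fl ++ fh) ++ [x] := by
        apply PySem.List.insertBy_of_forall_not_before
        intro y hy
        simp [hx']
      simp only [List.foldl_cons, step, List.append_assoc]
      rw [show fl ++ (fh ++ [x]) = fl ++ (fh ++ [x]) from rfl]
      rw [← List.append_assoc fl fh [x]]
      rw [show (fl ++ fh) ++ [x] = fl ++ (fh ++ [x]) by simp]
      rw [ih fl (fh ++ [x]) hl
        (fun y hy => by
          rcases List.mem_append.1 hy with h | h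
          · exact hh y h
          · rw [List.mem_singleton.1 h]; exact hx')]
      simp [hx']

theorem sorted_eq_partition (xs : List Char) :
    PySem.List.sorted xs (fun c => !(PySem.Chars.islower c)) false
    = xs.filter (fun c => PySem.Chars.islower c) ++ xs.filter (fun c => !(PySem.Chars.islower c)) := by
  rw [PySem.List.sorted_eq_foldl_insertBy]
  simpa using sorted_key_partition xs [] [] (by simp) (by simp)

-- A's fold collects exactly the two filters
theorem loop_eq_filters (xs : List Char) (l h : List Char) :
    xs.foldl (fun (acc : List Char × List Char) c =>
        if PySem.Chars.islower c then (acc.1 ++ [c], acc.2) else (acc.1, acc.2 ++ [c])) (l, h)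
    = (l ++ xs.filter (fun c => PySem.Chars.islower c),
       h ++ xs.filter (fun c => !(PySem.Chars.islower c))) := by
  induction xs generalizing l h with
  | nil => simp
  | cons x t ih =>
    by_cases hx : PySem.Chars.islower x = true
    · simp [hx, ih]
    · have hx' : PySem.Chars.islower x = false := by simpa using hx
      simp [hx', ih]

-- ===== VERDICT (by name: the statement is the Claim_ definition above) =====
theorem lowerFirst_spec : Claim_equal_lowerFirst := by
  intro s _
  unfold Spec_lowerFirst lowerFirst lowerFirst_alt
  rw [sorted_eq_partition, loop_eq_filters]
  simp [String.ofList_append]
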